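-- pv_equiv track=rewrite | github.com/toshikistan/Hillel_pro_hw | HW19/task1.py | find_deepest_length
-- ===== SOURCE A (Python) =====
-- def find_deepest_length(height_points):
--     n = len(height_points)
--     max_depth = 0
--
--     for i in range(1, n - 1):
--         left_max = max(height_points[:i])
--         right_max = max(height_points[i + 1 :])
--
--         if height_points[i] < left_max and height_points[i] < right_max:
--             max_depth = max(max_depth, min(left_max, right_max) - height_points[i])
--
--     return max_depth
-- ===== SOURCE B (Python) =====
-- def find_deepest_length(height_points):
--     n = len(height_points)
--     if n < 3:
--         return 0
--     suf = [0] * n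
--     suf[n - 1] = height_points[n - 1]
--     for i in range(n - 2, -1, -1):
--         suf[i] = max(height_points[i], suf[i + 1])
--     best = 0
--     left = height_points[0]
--     for i in range(1, n - 1):
--         h = height_points[i]
--         r = suf[i + 1]
--         if h < left and h < r:
--             best = max(best, min(left, r) - h)
--         left = max(left, h)
--     return best
-- ===== Notes on version B (the rewrite author's own statement) =====
-- stated objective: faster
-- what changed: A recomputes max(prefix) and max(suffix) from scratch for every index (O(n^2)); B builds one suffix-max array right-to-left and then does a single left-to-right pass carrying a running prefix maximum (O(n)).
import Mathlib
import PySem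

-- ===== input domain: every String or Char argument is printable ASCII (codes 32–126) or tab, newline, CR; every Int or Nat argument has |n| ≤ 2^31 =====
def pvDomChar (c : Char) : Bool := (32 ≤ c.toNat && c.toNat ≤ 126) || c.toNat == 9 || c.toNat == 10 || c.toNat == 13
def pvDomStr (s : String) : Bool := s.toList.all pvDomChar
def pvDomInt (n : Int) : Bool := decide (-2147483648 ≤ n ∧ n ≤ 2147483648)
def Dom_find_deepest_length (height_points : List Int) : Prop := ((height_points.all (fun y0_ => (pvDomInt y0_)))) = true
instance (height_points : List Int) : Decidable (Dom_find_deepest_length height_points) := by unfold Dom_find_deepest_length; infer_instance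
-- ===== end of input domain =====

-- B replaces A's per-index max over both slices (O(n^2)) by one suffix-max array plus a
-- running prefix maximum in a single left-to-right pass (O(n)); objective: faster (asymptotic).

-- ===== PORT A =====
def find_deepest_length (height_points : List Int) : Int :=
  let n : Int := height_points.length
  (PySem.List.pyRange 1 (n - 1) 1).foldl (fun max_depth i =>
    let left_max := (PySem.List.max? (PySem.List.slice height_points none (some i)) id).getD 0
    let right_max := (PySem.List.max? (PySem.List.slice height_points (some (i + 1)) none) id).getD 0
    if PySem.List.pyGetD height_points i 0 < left_max ∧
        PySem.List.pyGetD height_points i 0 < right_max then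
      max max_depth (min left_max right_max - PySem.List.pyGetD height_points i 0)
    else max_depth) 0

-- ===== PORT B =====
-- right-to-left cumulative maxima: element j is max of xs[j:] (Source B's `suf` array, built recursively)
def sufMaxes : List Int → List Int
  | [] => []
  | x :: rest =>
    match sufMaxes rest with
    | [] => [x]
    | m :: ms => max x m :: m :: ms

-- Source B's forward pass: pairs (h, suffix max to the right of h), carrying the running prefix max `left`
def dipLoop : Int → Int → List (Int × Int) → Int
  | _, best, [] => best
  | left, best, (h, r) :: rest =>
    dipLoop (max left h) (if h < left ∧ h < r then max best (min left r - h) else best) rest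

def find_deepest_length_alt (height_points : List Int) : Int :=
  if height_points.length < 3 then 0
  else
    match height_points with
    | [] => 0
    | x :: rest => dipLoop x 0 (rest.zip ((sufMaxes height_points).drop 2))

-- ===== PRECONDITION & SPEC =====
def Spec_find_deepest_length (height_points : List Int) (out : Int) : Prop := out = find_deepest_length_alt height_points
instance (height_points : List Int) (out : Int) : Decidable (Spec_find_deepest_length height_points out) := by unfold Spec_find_deepest_length; infer_instance

-- ===== CLAIM (what is proved, stated in full; the proofs are below) =====
def Claim_equal_find_deepest_length : Prop := ∀ (height_points : List Int), Dom_find_deepest_length height_points → Spec_find_deepest_length height_points (find_deepest_length height_points)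

-- ===== LEMMAS AND PROOFS =====

-- max of a nonempty Int list (0 on [])
def mx : List Int → Int
  | [] => 0
  | a :: l => l.foldl max a

-- A's loop body, named so the fold can be talked about
def stepA (xs : List Int) (max_depth i : Int) : Int :=
  let left_max := (PySem.List.max? (PySem.List.slice xs none (some i)) id).getD 0
  let right_max := (PySem.List.max? (PySem.List.slice xs (some (i + 1)) none) id).getD 0
  if PySem.List.pyGetD xs i 0 < left_max ∧ PySem.List.pyGetD xs i 0 < right_max then
    max max_depth (min left_max right_max - PySem.List.pyGetD xs i 0)
  else max_depth

-- common reference recursion: scan the suffix carrying the prefix max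
def refB : Int → Int → List Int → Int
  | _, best, [] => best
  | _, best, [_] => best
  | left, best, h :: a :: t =>
    refB (max left h)
      (if h < left ∧ h < mx (a :: t) then max best (min left (mx (a :: t)) - h) else best)
      (a :: t)

lemma find_deepest_length_eq (xs : List Int) :
    find_deepest_length xs
      = (PySem.List.pyRange 1 ((xs.length : Int) - 1) 1).foldl (stepA xs) 0 := rfl

lemma pyRange_one_nil {a b : Int} (h : b ≤ a) : PySem.List.pyRange a b 1 = [] := by
  unfold PySem.List.pyRange
  simp
  intro h2; omega

lemma max?_id_cons (l : List Int) : ∀ a : Int,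
    PySem.List.max? (a :: l) id = some (l.foldl max a) := by
  induction l with
  | nil => intro a; rfl
  | cons x t ih =>
    intro a
    have h1 : PySem.List.max? (a :: x :: t) id = PySem.List.max? (max a x :: t) id := by
      simp only [PySem.List.max?, List.foldl, id]
      split_ifs with h
      · rw [max_eq_right h.le]
      · rw [max_eq_left (not_lt.mp h)]
    rw [h1, ih (max a x)]
    simp [List.foldl]

lemma max?_getD_mx {p : List Int} (hp : p ≠ []) (d : Int) :
    (PySem.List.max? p id).getD d = mx p := by
  cases p with
  | nil => exact absurd rfl hp
  | cons a l => rw [max?_id_cons]; rfl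

lemma mx_append_singleton {p : List Int} (hp : p ≠ []) (h : Int) :
    mx (p ++ [h]) = max (mx p) h := by
  cases p with
  | nil => exact absurd rfl hp
  | cons a l => simp [mx, List.foldl_append]

lemma sufMaxes_cons (v : Int) (w : List Int) :
    sufMaxes (v :: w) = mx (v :: w) :: sufMaxes w := by
  induction w generalizing v with
  | nil => rfl
  | cons u t ih =>
    rw [sufMaxes, ih u]
    have : mx (v :: u :: t) = max v (mx (u :: t)) := by
      simp only [mx, List.foldl]
      exact List.foldl_assoc
    rw [this]

lemma dipLoop_zip (t : List Int) : ∀ left best : Int,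
    dipLoop left best (t.zip ((sufMaxes t).drop 1)) = refB left best t := by
  induction t with
  | nil => intro left best; rfl
  | cons v w ih =>
    intro left best
    cases w with
    | nil => rfl
    | cons u t' =>
      rw [sufMaxes_cons v (u :: t')]
      simp only [List.drop_succ_cons, List.drop_zero]
      rw [sufMaxes_cons u t']
      simp only [List.zip_cons_cons, dipLoop, refB]
      have := ih (max left v)
        (if v < left ∧ v < mx (u :: t') then max best (min left (mx (u :: t')) - v) else best)
      rw [sufMaxes_cons u t'] at this
      simpa using this

lemma getD_append_cons (p : List Int) (h : Int) (u : List Int) (d : Int) :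
    (p ++ h :: u).getD p.length d = h := by
  simp [List.getD]

lemma foldl_stepA_refB (t : List Int) : ∀ (p : List Int), p ≠ [] → ∀ best : Int,
    (PySem.List.pyRange (p.length : Int) ((p.length : Int) + t.length - 1) 1).foldl
        (stepA (p ++ t)) best
      = refB (mx p) best t := by
  induction t with
  | nil =>
    intro p _ best
    rw [pyRange_one_nil (by simp only [List.length_nil, Nat.cast_zero]; omega)]
    rfl
  | cons h u ih =>
    intro p hp best
    cases u with
    | nil =>
      rw [pyRange_one_nil (by simp only [List.length_cons, List.length_nil]; push_cast; omega)]
      rfl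
    | cons a t' =>
      have hlt : (p.length : Int) < (p.length : Int) + (h :: a :: t').length - 1 := by
        simp only [List.length_cons]; push_cast; omega
      rw [PySem.List.pyRange_one_cons hlt]
      simp only [List.foldl]
      -- the first iteration is stepA at index p.length
      have hstep : stepA (p ++ h :: a :: t') best (p.length : Int)
          = (if h < mx p ∧ h < mx (a :: t') then max best (min (mx p) (mx (a :: t')) - h)
             else best) := by
        unfold stepA
        rw [PySem.List.slice_to_natCast, List.take_left]
        have hcast : ((p.length : Int) + 1) = ((p.length + 1 : Nat) : Int) := by push_cast; ring
        rw [hcast, PySem.List.slice_from_natCast]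
        have hdrop : List.drop (p.length + 1) (p ++ h :: a :: t') = a :: t' := by
          have : p ++ h :: a :: t' = (p ++ [h]) ++ a :: t' := by simp
          rw [this]
          have hlen : p.length + 1 = (p ++ [h]).length := by simp
          rw [hlen, List.drop_left]
        rw [hdrop]
        rw [PySem.List.pyGetD_natCast, getD_append_cons]
        rw [max?_getD_mx hp, max?_getD_mx (by simp)]
      rw [hstep]
      -- the rest is the induction hypothesis at p ++ [h]
      have hrange : ((p.length : Int) + 1) = (((p ++ [h]).length : Nat) : Int) := by
        simp only [List.length_append, List.length_cons, List.length_nil]; push_cast; ring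
      have hbound : (p.length : Int) + (h :: a :: t').length - 1
          = (((p ++ [h]).length : Nat) : Int) + (a :: t').length - 1 := by
        simp only [List.length_append, List.length_cons, List.length_nil]; push_cast; ring
      rw [hrange, hbound]
      have hlist : p ++ h :: a :: t' = (p ++ [h]) ++ a :: t' := by simp
      rw [hlist]
      rw [ih (p ++ [h]) (by simp)]
      rw [mx_append_singleton hp]
      rfl

-- ===== VERDICT (by name: the statement is the Claim_ definition above) =====
theorem find_deepest_length_spec : Claim_equal_find_deepest_length := by
  intro xs _
  unfold Spec_find_deepest_length find_deepest_length_alt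
  by_cases hlen : xs.length < 3
  · simp only [hlen, if_true]
    rw [find_deepest_length_eq, pyRange_one_nil (by omega)]
    rfl
  · simp only [hlen, if_false]
    match xs, hlen with
    | [], h => exact absurd (by simp) h
    | [x], h => exact absurd (by simp) h
    | [x, a], h => exact absurd (by simp) h
    | x :: a :: b :: t, _ =>
      rw [sufMaxes_cons x (a :: b :: t)]
      have hdrop2 : (mx (x :: a :: b :: t) :: sufMaxes (a :: b :: t)).drop 2
          = (sufMaxes (a :: b :: t)).drop 1 := rfl
      rw [hdrop2]
      show find_deepest_length (x :: a :: b :: t)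
          = dipLoop x 0 ((a :: b :: t).zip (List.drop 1 (sufMaxes (a :: b :: t))))
      rw [dipLoop_zip (a :: b :: t) x 0]
      rw [find_deepest_length_eq, show (x :: a :: b :: t : List Int) = [x] ++ (a :: b :: t) from rfl]
      have h4 := foldl_stepA_refB (a :: b :: t) [x] (by simp) 0
      rw [show mx [x] = x from rfl] at h4
      simp only [List.length_cons, List.length_nil, List.length_append] at h4 ⊢
      push_cast at h4 ⊢
      ring_nf at h4 ⊢
      exact h4
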